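-- pv_equiv track=rewrite | github.com/james-roden/Google_Foobar | Access_Codes.py | answer
-- ===== SOURCE A (Python) =====
-- def answer(x):
--     """
--     As specified
--     """
--
--     # Dictionary for codes
--     codes = {}
--     for code in x:
--         if code in codes:
--             codes[code] += 1
--         else:
--             # Check if reversed code is in dict
--             if code[::-1] in codes:
--                 codes[code[::-1]] += 1
--             # If code (or reversed code) not in dict, add it
--             else:
--                 codes[code] = codes.get(code, 0) + 1
--     # Return unique access codes
--     return len(codes)
-- ===== SOURCE B (Python) =====
-- def answer(x):
--     # Stage 1: canonicalize each code to min(code, reversed code);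
--     # Stage 2: sort the canonical forms so equal classes become adjacent;
--     # Stage 3: linear scan counting boundaries between distinct adjacent values.
--     ys = sorted(min(c, c[::-1]) for c in x)
--     count = 0
--     prev = None
--     for y in ys:
--         if y != prev:
--             count += 1
--             prev = y
--     return count
-- ===== Notes on version B (the rewrite author's own statement) =====
-- stated objective: alternative
-- what changed: Replaces A's hash-dict with first-seen-orientation membership branches and counters by a sort-based dedup: canonicalize every code to min(c, c[::-1]), sort the canonical forms, then count boundaries between distinct adjacent values in one scan -- no dictionary or membership test at all.
import Mathlib
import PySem

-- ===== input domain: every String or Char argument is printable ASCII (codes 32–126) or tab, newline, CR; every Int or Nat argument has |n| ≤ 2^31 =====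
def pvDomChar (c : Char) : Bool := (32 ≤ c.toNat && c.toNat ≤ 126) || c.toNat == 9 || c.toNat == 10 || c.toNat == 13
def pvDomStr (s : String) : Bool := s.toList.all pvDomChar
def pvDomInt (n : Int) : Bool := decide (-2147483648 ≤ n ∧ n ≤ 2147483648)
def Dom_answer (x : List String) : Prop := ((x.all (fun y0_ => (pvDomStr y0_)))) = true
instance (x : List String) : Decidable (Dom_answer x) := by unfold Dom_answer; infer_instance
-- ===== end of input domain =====

-- B replaces A's dict with first-seen-orientation membership branches by sort-based dedup:
-- canonicalize each code to min(c, c[::-1]), sort, count distinct-adjacent boundaries; same value.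

-- ===== PORT A =====
-- code[::-1]: slice with step -1; the step is the literal -1 ≠ 0, so slice? is always `some`
-- and the `.getD ""` default is never used (exact).
def pyRevStr (s : String) : String := (PySem.Str.slice? s none none (-1)).getD ""

def answerStep (codes : PySem.Dict String Int) (code : String) : PySem.Dict String Int :=
  if codes.contains code then codes.modify code 0 (· + 1)
  else if codes.contains (pyRevStr code) then codes.modify (pyRevStr code) 0 (· + 1)
  else codes.insert code (codes.getD code 0 + 1)

def answer (x : List String) : Int :=
  ((x.foldl answerStep PySem.Dict.empty).size : Int)

-- ===== PORT B =====
-- min(c, c[::-1]): Python's min returns the second argument only when it is strictly smaller;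
-- Python str '<' is Lean's String '<' (code-point lexicographic, per PYSEM.md).
def canonCode (c : String) : String := if pyRevStr c < c then pyRevStr c else c

-- the scan loop's state: (count, prev); `y != prev` with prev=None is True
def scanStep (acc : Int × Option String) (y : String) : Int × Option String :=
  if acc.2 = some y then acc else (acc.1 + 1, some y)

def answer_alt (x : List String) : Int :=
  ((PySem.List.sorted (x.map canonCode) (fun s => s) false).foldl scanStep (0, none)).1

-- ===== PRECONDITION & SPEC =====
def Spec_answer (x : List String) (out : Int) : Prop := out = answer_alt x
instance (x : List String) (out : Int) : Decidable (Spec_answer x out) := by unfold Spec_answer; infer_instance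

-- ===== CLAIM (what is proved, stated in full; the proofs are below) =====
def Claim_equal_answer : Prop := ∀ (x : List String), Dom_answer x → Spec_answer x (answer x)

-- ===== LEMMAS AND PROOFS =====

theorem pyRevStr_toList (s : String) : (pyRevStr s).toList = s.toList.reverse := by
  simp [pyRevStr, pysem]

theorem pyRevStr_invol (s : String) : pyRevStr (pyRevStr s) = s := by
  have h2 := pyRevStr_toList (pyRevStr s)
  rw [pyRevStr_toList s, List.reverse_reverse] at h2
  exact String.toList_injective h2

theorem canonCode_rev (c : String) : canonCode (pyRevStr c) = canonCode c := by
  unfold canonCode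
  rw [pyRevStr_invol]
  split_ifs with h1 h2 h2
  · exact absurd h2 (lt_asymm h1)
  · rfl
  · rfl
  · exact le_antisymm (not_lt.mp h1) (not_lt.mp h2)

theorem canonCode_cases {k c : String} (h : canonCode k = canonCode c) :
    k = c ∨ k = pyRevStr c := by
  unfold canonCode at h
  split_ifs at h with h1 h2 h2
  · left
    have := congrArg pyRevStr h
    rwa [pyRevStr_invol, pyRevStr_invol] at this
  · right
    have := congrArg pyRevStr h
    rwa [pyRevStr_invol] at this
  · right; exact h
  · left; exact h

-- A-side: the dict's keys, mapped through canonCode, are the set of canonical forms seen so far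
theorem answerStep_keys (d : PySem.Dict String Int) (c : String) (hnd : d.keys.Nodup) :
    (answerStep d c).keys.Nodup ∧
      (answerStep d c).keys.map canonCode =
        PySem.Set.add (d.keys.map canonCode) (canonCode c) := by
  unfold answerStep
  split_ifs with h1 h2
  · have hc : c ∈ d.keys := (PySem.Dict.contains_iff_mem_keys d c).mp h1
    rw [PySem.Dict.keys_modify, PySem.Dict.keys_insert_of_contains _ _ h1]
    exact ⟨hnd, (PySem.Set.add_of_mem (List.mem_map_of_mem hc)).symm⟩
  · have hc : pyRevStr c ∈ d.keys := (PySem.Dict.contains_iff_mem_keys d _).mp h2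
    rw [PySem.Dict.keys_modify, PySem.Dict.keys_insert_of_contains _ _ h2]
    refine ⟨hnd, ?_⟩
    have : canonCode c ∈ d.keys.map canonCode := by
      have := List.mem_map_of_mem (f := canonCode) hc
      rwa [canonCode_rev] at this
    exact (PySem.Set.add_of_mem this).symm
  · have hc : c ∉ d.keys := fun hm =>
      h1 ((PySem.Dict.contains_iff_mem_keys d c).mpr hm)
    have hr : pyRevStr c ∉ d.keys := fun hm =>
      h2 ((PySem.Dict.contains_iff_mem_keys d _).mpr hm)
    have hkeys : (d.insert c (d.getD c 0 + 1)).keys = d.keys ++ [c] := by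
      apply PySem.Dict.keys_insert_of_not_contains
      cases hcc : d.contains c with
      | false => rfl
      | true => exact absurd hcc h1
    rw [hkeys]
    constructor
    · rw [List.nodup_append]
      exact ⟨hnd, List.nodup_singleton c, by
        intro a ha b hb
        rw [List.mem_singleton] at hb
        subst hb
        exact fun h => hc (h ▸ ha)⟩
    · rw [List.map_append]
      have hnot : canonCode c ∉ d.keys.map canonCode := by
        intro hm
        obtain ⟨k, hk, hek⟩ := List.mem_map.mp hm
        rcases canonCode_cases hek with rfl | rfl
        · exact hc hk
        · exact hr hk
      rw [PySem.Set.add_of_not_mem hnot]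
      rfl

theorem fold_keys_inv (l : List String) (d : PySem.Dict String Int) (hnd : d.keys.Nodup) :
    (l.foldl answerStep d).keys.Nodup ∧
      (l.foldl answerStep d).keys.map canonCode =
        PySem.Set.update (d.keys.map canonCode) (l.map canonCode) := by
  induction l generalizing d with
  | nil => exact ⟨hnd, rfl⟩
  | cons c l ih =>
    simp only [List.foldl_cons, List.map_cons]
    obtain ⟨hnd', hkeys'⟩ := answerStep_keys d c hnd
    obtain ⟨hnd'', hkeys''⟩ := ih (answerStep d c) hnd'
    refine ⟨hnd'', ?_⟩
    rw [hkeys'', hkeys', PySem.Set.update_cons]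

-- B-side: scanning a ≤-sorted tail after prev = p (already counted, p ≤ everything ahead)
theorem card_cons_eq_card_filter_ne (y : String) (t : List String) :
    (y :: t).toFinset.card = (t.filter (· ≠ y)).toFinset.card + 1 := by
  rw [List.toFinset_cons, List.toFinset_filter]
  have h2 : t.toFinset.filter (fun a => decide (a ≠ y) = true) = t.toFinset.erase y := by
    ext a
    simp only [Finset.mem_filter, Finset.mem_erase, ne_eq, decide_eq_true_eq]
    tauto
  rw [h2]
  by_cases hmem : y ∈ t.toFinset
  · rw [Finset.insert_eq_self.mpr hmem, Finset.card_erase_of_mem hmem]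
    have := Finset.card_pos.mpr ⟨y, hmem⟩
    omega
  · rw [Finset.card_insert_of_notMem hmem, Finset.erase_eq_of_notMem hmem]

theorem scan_aux (l : List String) (c : Int) (p : String)
    (hs : l.Pairwise (· ≤ ·)) (hp : ∀ y ∈ l, p ≤ y) :
    (l.foldl scanStep (c, some p)).1 = c + ((l.filter (· ≠ p)).toFinset.card : Int) := by
  induction l generalizing c p with
  | nil => simp
  | cons y t ih =>
    have hpy : p ≤ y := hp y (List.mem_cons_self ..)
    have hyt : ∀ z ∈ t, y ≤ z := fun z hz => (List.pairwise_cons.mp hs).1 z hz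
    have hst : t.Pairwise (· ≤ ·) := (List.pairwise_cons.mp hs).2
    by_cases hey : y = p
    · subst hey
      have hstep : scanStep (c, some y) y = (c, some y) := by simp [scanStep]
      simp only [List.foldl_cons, hstep]
      rw [ih c y hst hyt]
      congr 2
      simp
    · have hlt : p < y := lt_of_le_of_ne hpy (fun h => hey h.symm)
      have hstep : scanStep (c, some p) y = (c + 1, some y) := by
        simp only [scanStep]
        rw [if_neg]
        simp only [Option.some.injEq]
        exact fun h => hey h.symm
      simp only [List.foldl_cons, hstep]
      rw [ih (c + 1) y hst hyt]
      have htp : t.filter (· ≠ p) = t := by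
        apply List.filter_eq_self.mpr
        intro a ha
        simp only [ne_eq, decide_eq_true_eq]
        exact ne_of_gt (lt_of_lt_of_le hlt (hyt a ha))
      have hfy : (List.filter (· ≠ p) (y :: t)) = y :: t := by
        rw [List.filter_cons]
        have : (decide (y ≠ p)) = true := by
          simp only [ne_eq, decide_eq_true_eq]; exact hey
        rw [if_pos this, htp]
      rw [hfy, card_cons_eq_card_filter_ne y t]
      push_cast
      ring

theorem scan_sorted (l : List String) (hs : l.Pairwise (· ≤ ·)) :
    (l.foldl scanStep ((0 : Int), (none : Option String))).1 = (l.toFinset.card : Int) := by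
  cases l with
  | nil => simp
  | cons y t =>
    have hstep : scanStep (0, none) y = (1, some y) := by simp [scanStep]
    simp only [List.foldl_cons, hstep]
    have hyt : ∀ z ∈ t, y ≤ z := fun z hz => (List.pairwise_cons.mp hs).1 z hz
    rw [scan_aux t 1 y (List.pairwise_cons.mp hs).2 hyt, card_cons_eq_card_filter_ne y t]
    push_cast
    ring

-- distinct count of any list equals its Set's length
theorem setOfList_length_eq_card (l : List String) :
    (PySem.Set.ofList l).length = l.toFinset.card := by
  have hnd := PySem.Set.nodup_ofList (xs := l)
  have hfs : (PySem.Set.ofList l).toFinset = l.toFinset := by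
    ext a; simp [List.mem_toFinset, PySem.Set.mem_ofList]
  rw [← List.toFinset_card_of_nodup hnd, hfs]

-- ===== VERDICT (by name: the statement is the Claim_ definition above) =====
theorem answer_spec : Claim_equal_answer := by
  intro x _
  unfold Spec_answer answer answer_alt
  obtain ⟨_, hkeys⟩ :=
    fold_keys_inv x PySem.Dict.empty PySem.Dict.nodup_keys_empty
  set lc := x.map canonCode with hlc
  -- A's size = |set of canonical forms|
  have hA : (x.foldl answerStep PySem.Dict.empty).size
      = (PySem.Set.ofList lc).length := by
    have h1 : ((x.foldl answerStep PySem.Dict.empty).keys.map canonCode).length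
        = (PySem.Set.ofList lc).length := by
      rw [hkeys]; rfl
    simpa [PySem.Dict.size, PySem.Dict.keys, List.length_map] using h1
  -- B's scan over the sorted canonical list = the same count
  set ys := PySem.List.sorted lc (fun s => s) false with hys
  have hperm : ys.Perm lc := PySem.List.sorted_perm ..
  have hpw : ys.Pairwise (· ≤ ·) := by
    have := PySem.List.sorted_pairwise (xs := lc) (key := fun s => s)
    simpa using this
  have hB : (ys.foldl scanStep ((0 : Int), (none : Option String))).1
      = ((PySem.Set.ofList lc).length : Int) := by
    have hfe : ys.toFinset = lc.toFinset := by
      ext a; simp only [List.mem_toFinset]; exact hperm.mem_iff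
    rw [scan_sorted ys hpw, hfe, setOfList_length_eq_card]
  rw [hA, hB]
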